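-- pv_equiv track=rewrite | github.com/jramaswami/Advent-Of-Code-2018 | 14/python/test_day14.py | parse_test_data
-- ===== SOURCE A (Python) =====
-- from collections import namedtuple
--
-- TickResult = namedtuple('TickResult', ['board', 'elf1_pos', 'elf2_pos'])
--
-- def parse_test_data(input_string):
--     "Parse the test data."
--     board = []
--     tokens = input_string.split()
--     elf1 = elf2 = 0
--     for index, token in enumerate(tokens):
--         token = token.strip()
--         if token[0] == "(":
--             score = int(token[1])
--             elf1 = index
--         elif token[0] == '[':
--             score = int(token[1])
--             elf2 = index
--         else:
--             score = int(token)
--         board.append(score)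
--     return TickResult(board, elf1, elf2)
-- ===== SOURCE B (Python) =====
-- from collections import namedtuple
--
-- TickResult = namedtuple('TickResult', ['board', 'elf1_pos', 'elf2_pos'])
--
-- def parse_test_data(input_string):
--     "Parse the test data."
--     tokens = input_string.split()
--     board = [int(t[1]) if t[0] in "([" else int(t) for t in tokens]
--     elf1 = next((i for i, t in reversed(list(enumerate(tokens))) if t[0] == "("), 0)
--     elf2 = next((i for i, t in reversed(list(enumerate(tokens))) if t[0] == "["), 0)
--     return TickResult(board, elf1, elf2)
-- ===== Notes on version B (the rewrite author's own statement) =====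
-- stated objective: alternative
-- what changed: Replaces A's single fused loop (board append + two elf-index accumulators with repeated reassignment) by three focused passes: a list comprehension for the board and, for each elf, one backward scan that takes the first matching index from the right (= A's last match), defaulting to 0.
-- outside the precondition, e.g. on parse_test_data('('): A raises IndexError, B raises IndexError; on parse_test_data('['): A raises IndexError, B raises IndexError
import Mathlib
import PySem

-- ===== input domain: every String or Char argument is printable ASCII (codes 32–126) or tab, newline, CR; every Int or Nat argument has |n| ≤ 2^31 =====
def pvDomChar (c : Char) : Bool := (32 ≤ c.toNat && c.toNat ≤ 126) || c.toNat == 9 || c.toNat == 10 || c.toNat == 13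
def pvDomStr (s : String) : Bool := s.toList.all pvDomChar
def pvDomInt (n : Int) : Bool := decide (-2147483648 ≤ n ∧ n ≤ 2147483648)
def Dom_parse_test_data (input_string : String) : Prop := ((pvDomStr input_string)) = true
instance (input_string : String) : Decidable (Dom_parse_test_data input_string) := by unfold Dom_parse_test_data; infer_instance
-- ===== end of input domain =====

-- B replaces A's fused loop by three focused passes (board comprehension + one backward scan per elf); same cost, no speed claim.

-- ===== PORT A =====
-- loop body of A: state (board, elf1, elf2), element (index, token)
def pvTokA (st : List Int × Int × Int) (p : Int × List Char) : List Int × Int × Int :=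
  let token := PySem.Chars.strip p.2
  if PySem.List.pyGet? token 0 = some '(' then
    (st.1 ++ [(PySem.Int.ofChars? [PySem.List.pyGetD token 1 ' ']).getD 0], p.1, st.2.2)
  else if PySem.List.pyGet? token 0 = some '[' then
    (st.1 ++ [(PySem.Int.ofChars? [PySem.List.pyGetD token 1 ' ']).getD 0], st.2.1, p.1)
  else
    (st.1 ++ [(PySem.Int.ofChars? token).getD 0], st.2.1, st.2.2)

def parse_test_data (input_string : String) : List Int × Int × Int :=
  (PySem.List.enumerate (PySem.Chars.split₀ input_string.toList) 0).foldl pvTokA ([], 0, 0)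

-- ===== PORT B =====
-- board entry for one token: int(t[1]) if t[0] in "([" else int(t)
def pvScoreB (t : List Char) : Int :=
  if PySem.Chars.isIn [PySem.List.pyGetD t 0 ' '] ['(', '['] then
    (PySem.Int.ofChars? [PySem.List.pyGetD t 1 ' ']).getD 0
  else
    (PySem.Int.ofChars? t).getD 0

-- next((i for i, t in reversed(list(enumerate(tokens))) if t[0] == c), 0)
def pvFindRev (en : List (Int × List Char)) (c : Char) : Int :=
  ((en.reverse.find? (fun p => PySem.List.pyGetD p.2 0 ' ' == c)).map (·.1)).getD 0

def parse_test_data_alt (input_string : String) : List Int × Int × Int :=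
  let tokens := PySem.Chars.split₀ input_string.toList
  let en := PySem.List.enumerate tokens 0
  (tokens.map pvScoreB, pvFindRev en '(', pvFindRev en '[')

-- ===== PRECONDITION & SPEC =====
-- a token is accepted by A without raising: after '(' or '[' there must be a second
-- character parsed by int(); any other token must parse by int() as a whole
def pvTokOk (t : List Char) : Bool :=
  if PySem.List.pyGet? t 0 = some '(' ∨ PySem.List.pyGet? t 0 = some '[' then
    decide (2 ≤ t.length) && (PySem.Int.ofChars? [PySem.List.pyGetD t 1 ' ']).isSome
  else
    (PySem.Int.ofChars? t).isSome

-- Pre_ excludes exactly the inputs where Python A raises (IndexError on a bare '('/'[' token, ValueError from int())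
def Pre_parse_test_data (input_string : String) : Prop :=
  ∀ t ∈ PySem.Chars.split₀ input_string.toList, pvTokOk t = true
instance (input_string : String) : Decidable (Pre_parse_test_data input_string) := by
  unfold Pre_parse_test_data; infer_instance

def pvWitness_parse_test_data : String := "3 (7) 10 [5]"

def Spec_parse_test_data (input_string : String) (out : List Int × Int × Int) : Prop :=
  out = parse_test_data_alt input_string
instance (input_string : String) (out : List Int × Int × Int) : Decidable (Spec_parse_test_data input_string out) := by
  unfold Spec_parse_test_data; infer_instance

-- ===== CLAIM (what is proved, stated in full; the proofs are below) =====
def Claim_equal_parse_test_data : Prop := ∀ (input_string : String), Dom_parse_test_data input_string → Pre_parse_test_data input_string → Spec_parse_test_data input_string (parse_test_data input_string)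

-- ===== LEMMAS AND PROOFS =====

-- tokens produced by split() are nonempty and contain no whitespace (invariant of split₀.go)
theorem pv_go_wf (s : List Char) : ∀ (cur : List Char) (acc : List (List Char)),
    (∀ c ∈ cur, PySem.Chars.isspace c = false) →
    (∀ t ∈ acc, t ≠ [] ∧ ∀ c ∈ t, PySem.Chars.isspace c = false) →
    ∀ t ∈ PySem.Chars.split₀.go s cur acc, t ≠ [] ∧ ∀ c ∈ t, PySem.Chars.isspace c = false := by
  induction s with
  | nil =>
    intro cur acc hcur hacc t ht
    by_cases hc : cur = []
    · subst hc; simp [PySem.Chars.split₀.go] at ht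
      exact hacc t (by simpa using ht)
    · simp [PySem.Chars.split₀.go, List.isEmpty_iff, hc] at ht
      rcases ht with ht | ht
      · exact hacc t (by simpa using ht)
      · subst ht
        refine ⟨by simpa using hc, ?_⟩
        intro c hc'; exact hcur c (by simpa using hc')
  | cons a rest ih =>
    intro cur acc hcur hacc t ht
    by_cases hs : PySem.Chars.isspace a = true
    · by_cases hc : cur = []
      · subst hc
        simp only [PySem.Chars.split₀.go, hs, if_pos, List.isEmpty_nil] at ht
        exact ih [] acc (by simp) hacc t ht
      · simp only [PySem.Chars.split₀.go, hs, if_pos] at ht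
        rw [if_neg (by simpa [List.isEmpty_iff] using hc)] at ht
        refine ih [] _ (by simp) ?_ t ht
        intro u hu
        rcases List.mem_cons.mp hu with h | h
        · subst h
          exact ⟨by simpa using hc, fun c hcc => hcur c (by simpa using hcc)⟩
        · exact hacc u h
    · simp only [PySem.Chars.split₀.go, hs] at ht
      rw [if_neg (by simp [hs])] at ht
      refine ih (a :: cur) acc ?_ hacc t ht
      intro c hc
      rcases List.mem_cons.mp hc with h | h
      · subst h; simpa using hs
      · exact hcur c h

theorem pv_split₀_wf (s : List Char) :
    ∀ t ∈ PySem.Chars.split₀ s, t ≠ [] ∧ ∀ c ∈ t, PySem.Chars.isspace c = false := by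
  have := pv_go_wf s [] [] (by simp) (by simp)
  simpa [PySem.Chars.split₀] using this

theorem pv_dropWhile_eq_self (p : Char → Bool) (l : List Char) (h : ∀ c ∈ l, p c = false) :
    l.dropWhile p = l := by
  induction l with
  | nil => rfl
  | cons a t ih => simp [List.dropWhile, h a (by simp)]

theorem pv_strip_eq (t : List Char) (h : ∀ c ∈ t, PySem.Chars.isspace c = false) :
    PySem.Chars.strip t = t := by
  unfold PySem.Chars.strip PySem.Chars.lstrip PySem.Chars.rstrip
  rw [pv_dropWhile_eq_self _ t h, pv_dropWhile_eq_self _ t.reverse (fun c hc => h c (by simpa using hc)),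
      List.reverse_reverse]

-- backward first-match with an arbitrary default (pvFindRev = pvElf · · 0)
def pvElf (en : List (Int × List Char)) (c : Char) (d : Int) : Int :=
  ((en.reverse.find? (fun p => PySem.List.pyGetD p.2 0 ' ' == c)).map (·.1)).getD d

theorem pvElf_cons (x : Int × List Char) (l : List (Int × List Char)) (c : Char) (d : Int) :
    pvElf (x :: l) c d = pvElf l c (if PySem.List.pyGetD x.2 0 ' ' == c then x.1 else d) := by
  unfold pvElf
  rw [List.reverse_cons, List.find?_append]
  cases h : l.reverse.find? (fun p => PySem.List.pyGetD p.2 0 ' ' == c) <;>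
    by_cases hx : PySem.List.pyGetD x.2 0 ' ' == c <;> simp [hx, List.find?]

theorem pv_isIn_pair (c : Char) :
    PySem.Chars.isIn [c] ['(', '['] = (c == '(' || c == '[') := by
  by_cases h1 : c = '('
  · subst h1; decide
  by_cases h2 : c = '['
  · subst h2; decide
  have hmem : c ∉ ['(', '['] := by simp [h1, h2]
  have hni : ¬ ([c] <:+: ['(', '[']) := fun hinf => hmem ((List.singleton_infix_iff c _).mp hinf)
  have hf : PySem.Chars.isIn [c] ['(', '['] = false := by
    cases hb : PySem.Chars.isIn [c] ['(', '[']
    · rfl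
    · exact absurd ((PySem.Chars.isIn_iff_infix _ _).mp hb) hni
  simp [hf, h1, h2]

-- the fused loop of A computes the board comprehension and the two backward scans of B
theorem pv_fold_eq (ts : List (List Char)) : ∀ (i : Int) (b : List Int) (e1 e2 : Int),
    (∀ t ∈ ts, t ≠ [] ∧ ∀ c ∈ t, PySem.Chars.isspace c = false) →
    (PySem.List.enumerate ts i).foldl pvTokA (b, e1, e2) =
      (b ++ ts.map pvScoreB,
       pvElf (PySem.List.enumerate ts i) '(' e1,
       pvElf (PySem.List.enumerate ts i) '[' e2) := by
  induction ts with
  | nil => intro i b e1 e2 _; simp [PySem.List.enumerate_nil, pvElf]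
  | cons t rest ih =>
    intro i b e1 e2 hwf
    obtain ⟨hne, hns⟩ := hwf t (by simp)
    obtain ⟨ch, tl, rfl⟩ := List.exists_cons_of_ne_nil hne
    have hrest : ∀ u ∈ rest, u ≠ [] ∧ ∀ c ∈ u, PySem.Chars.isspace c = false :=
      fun u hu => hwf u (List.mem_cons_of_mem _ hu)
    rw [PySem.List.enumerate_cons]
    rw [List.foldl_cons]
    have hstrip : PySem.Chars.strip (ch :: tl) = ch :: tl := pv_strip_eq _ hns
    rw [pvElf_cons, pvElf_cons]
    simp only [pvTokA, hstrip, PySem.List.pyGet?_zero_cons, PySem.List.pyGetD_zero_cons]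
    by_cases h1 : ch = '('
    · subst h1
      simp only [Option.some.injEq, if_neg (by decide : ¬ ('(' = '[')),
        beq_self_eq_true, if_true]
      rw [ih (i + 1) _ _ _ hrest]
      simp [pvScoreB, pv_isIn_pair]
    · by_cases h2 : ch = '['
      · subst h2
        rw [if_neg (by simp), if_pos rfl]
        rw [ih (i + 1) _ _ _ hrest]
        simp [pvScoreB, pv_isIn_pair]
      · rw [if_neg (by simp [h1]), if_neg (by simp [h2])]
        rw [ih (i + 1) _ _ _ hrest]
        simp [pvScoreB, pv_isIn_pair, h1, h2]

-- ===== VERDICT (by name: the statement is the Claim_ definition above) =====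
theorem parse_test_data_spec : Claim_equal_parse_test_data := by
  intro s _ _
  unfold Spec_parse_test_data parse_test_data parse_test_data_alt
  rw [pv_fold_eq _ 0 [] 0 0 (pv_split₀_wf s.toList)]
  rfl
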